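-- pv_equiv track=rewrite | github.com/mderoullers/rex-automate-assessments | terraform/source/main.py | is_test_automated
-- ===== SOURCE A (Python) =====
-- def is_test_automated(values):
--     number = 0
--     for value in values:
--         if value == "No automation":
--             return "KO"
--         number = number + 1
--     if number == 1:
--         return "WARN"
--     if number > 1:
--         return "OK"
-- ===== SOURCE B (Python) =====
-- def is_test_automated(values):
--     # Back-to-front fold with a classification accumulator: KO is absorbing,
--     # a None accumulator means this is the last entry (WARN), anything
--     # already classified means at least two entries (OK). No counter, no len.
--     state = None
--     for v in reversed(values):
--         if v == "No automation" or state == "KO":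
--             state = "KO"
--         elif state is None:
--             state = "WARN"
--         else:
--             state = "OK"
--     return state
-- ===== Notes on version B (the rewrite author's own statement) =====
-- stated objective: alternative
-- what changed: Replaces A's forward counting loop (early-return on match, then branch on the count) by a back-to-front fold whose accumulator is the classification itself: KO is absorbing, a None accumulator upgrades to WARN, an already-classified one to OK; no counter and no length are ever computed.
import Mathlib
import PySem

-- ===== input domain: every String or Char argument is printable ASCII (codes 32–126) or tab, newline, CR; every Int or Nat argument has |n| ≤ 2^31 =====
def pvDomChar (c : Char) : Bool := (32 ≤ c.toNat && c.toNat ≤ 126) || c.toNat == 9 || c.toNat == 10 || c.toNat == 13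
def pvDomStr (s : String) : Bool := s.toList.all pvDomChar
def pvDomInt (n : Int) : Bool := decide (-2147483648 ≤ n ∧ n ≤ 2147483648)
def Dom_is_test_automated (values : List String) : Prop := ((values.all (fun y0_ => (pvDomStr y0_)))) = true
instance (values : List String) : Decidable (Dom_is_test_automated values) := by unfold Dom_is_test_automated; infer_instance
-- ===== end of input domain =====

-- B replaces A's counting loop with a structural recursion that classifies the tail and combines the result (objective: alternative).

-- ===== PORT A =====
-- the loop with its running counter `number`; early return "KO" on a match
def isTA_loop (values : List String) (number : Int) : Option String :=
  match values with
  | [] => if number = 1 then some "WARN" else if number > 1 then some "OK" else none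
  | v :: vs => if v = "No automation" then some "KO" else isTA_loop vs (number + 1)

def is_test_automated (values : List String) : Option String :=
  isTA_loop values 0

-- ===== PORT B =====
-- Source B: iterate over reversed(values) with the classification accumulator `state`
def isTA_step (state : Option String) (v : String) : Option String :=
  if v = "No automation" ∨ state = some "KO" then some "KO"
  else if state = none then some "WARN"
  else some "OK"

def is_test_automated_alt (values : List String) : Option String :=
  values.reverse.foldl isTA_step none

-- ===== PRECONDITION & SPEC =====
def Spec_is_test_automated (values : List String) (out : Option String) : Prop := out = is_test_automated_alt values
instance (values : List String) (out : Option String) : Decidable (Spec_is_test_automated values out) := by unfold Spec_is_test_automated; infer_instance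

-- ===== CLAIM (what is proved, stated in full; the proofs are below) =====
def Claim_equal_is_test_automated : Prop := ∀ (values : List String), Dom_is_test_automated values → Spec_is_test_automated values (is_test_automated values)

-- ===== LEMMAS AND PROOFS =====
-- common characterisation of the result
def isTA_char (values : List String) (number : Int) : Option String :=
  if values.contains "No automation" then some "KO"
  else if number + values.length = 1 then some "WARN"
  else if number + values.length > 1 then some "OK" else none

theorem isTA_loop_char (values : List String) (number : Int) :
    isTA_loop values number = isTA_char values number := by
  induction values generalizing number with
  | nil => simp [isTA_loop, isTA_char]
  | cons v vs ih =>
    by_cases hv : v = "No automation"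
    · simp [isTA_loop, isTA_char, hv]
    · have hb : ("No automation" == v) = false :=
        beq_eq_false_iff_ne.mpr (fun h => hv h.symm)
      simp only [isTA_loop, isTA_char, hv, if_false, List.contains_cons, ih, hb, Bool.false_or,
        List.length_cons]
      split
      · rfl
      · push_cast
        have h1 : number + 1 + (vs.length : Int) = number + ((vs.length : Int) + 1) := by ring
        rw [h1]

theorem isTA_foldr_char (values : List String) :
    values.foldr (fun v st => isTA_step st v) none = isTA_char values 0 := by
  induction values with
  | nil => simp [isTA_char]
  | cons v vs ih =>
    simp only [List.foldr_cons, ih]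
    by_cases hv : v = "No automation"
    · simp [isTA_step, isTA_char, hv]
    · have hb : ("No automation" == v) = false :=
        beq_eq_false_iff_ne.mpr (fun h => hv h.symm)
      unfold isTA_step isTA_char
      simp only [List.contains_cons, hb, Bool.false_or, List.length_cons, hv, false_or]
      by_cases hc : vs.contains "No automation" = true
      · have hm : "No automation" ∈ vs := by simpa using hc
        simp [hm]
      · have hc' : vs.contains "No automation" = false := by
          simpa using hc
        simp only [hc', Bool.false_eq_true, if_false]
        cases vs with
        | nil =>
            norm_num
            exact fun h => nomatch h
        | cons w ws =>
          have h1 : ¬ ((0:Int) + ((((w :: ws).length + 1 : Nat)) : Int) = 1) := by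
            simp only [List.length_cons]; push_cast; omega
          have h2 : (0:Int) + ((((w :: ws).length + 1 : Nat)) : Int) > 1 := by
            simp only [List.length_cons]; push_cast; omega
          rw [if_neg h1, if_pos h2]
          by_cases hw : (0:Int) + (((w :: ws).length : Nat) : Int) = 1
          · rw [if_pos hw]; simp
          · rw [if_neg hw]
            have h3 : (0:Int) + (((w :: ws).length : Nat) : Int) > 1 := by
              simp only [List.length_cons] at hw ⊢; push_cast at hw ⊢; omega
            rw [if_pos h3]; simp

theorem isTA_alt_char (values : List String) :
    is_test_automated_alt values = isTA_char values 0 := by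
  unfold is_test_automated_alt
  rw [List.foldl_reverse]
  exact isTA_foldr_char values

-- ===== VERDICT (by name: the statement is the Claim_ definition above) =====
theorem is_test_automated_spec : Claim_equal_is_test_automated := by
  intro values _
  unfold Spec_is_test_automated is_test_automated
  rw [isTA_loop_char, isTA_alt_char]
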